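-- pv_equiv track=rewrite | github.com/dogeee-debug/nlp_exp | src/analyze_results.py | word_seq_from_labels
-- ===== SOURCE A (Python) =====
-- def word_seq_from_labels(sent):
--     words = []
--     current_word = ""
--     for char, label in sent:
--         current_word += char
--         if label in ["E","S"]:
--             words.append(current_word)
--             current_word = ""
--     return words
-- ===== SOURCE B (Python) =====
-- def word_seq_from_labels(sent):
--     # Split at boundary labels: repeatedly find the first 'E'/'S' position,
--     # emit the chars up to and including it as one word, and continue after it.
--     words = []
--     rest = sent
--     while rest:
--         k = None
--         for i, (_, label) in enumerate(rest):
--             if label in ("E", "S"):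
--                 k = i
--                 break
--         if k is None:
--             break  # trailing chars with no closing boundary are dropped
--         words.append("".join(ch for ch, _ in rest[:k + 1]))
--         rest = rest[k + 1:]
--     return words
-- ===== Notes on version B (the rewrite author's own statement) =====
-- stated objective: alternative
-- what changed: Replaces A's single fold carrying a growing current_word accumulator with a split-at-boundary decomposition: repeatedly locate the first 'E'/'S' label, join the chars up to and including it into one word, and recurse on the suffix.
import Mathlib
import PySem

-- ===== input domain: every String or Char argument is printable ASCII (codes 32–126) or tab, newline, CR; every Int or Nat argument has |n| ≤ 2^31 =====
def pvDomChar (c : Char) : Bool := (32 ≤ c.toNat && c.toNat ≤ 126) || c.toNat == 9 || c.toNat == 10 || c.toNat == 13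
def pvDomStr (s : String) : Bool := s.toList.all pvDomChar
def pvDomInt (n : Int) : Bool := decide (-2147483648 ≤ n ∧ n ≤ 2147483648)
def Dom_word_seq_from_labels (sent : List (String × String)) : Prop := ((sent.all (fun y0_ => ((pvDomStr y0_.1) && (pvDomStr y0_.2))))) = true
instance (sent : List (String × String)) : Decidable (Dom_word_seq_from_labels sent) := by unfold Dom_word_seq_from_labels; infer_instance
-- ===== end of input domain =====

-- B replaces A's fold with a growing current_word accumulator by a split-at-boundary
-- decomposition (find first 'E'/'S', join that segment, recurse on the suffix); same cost.

-- ===== PORT A =====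
def word_seq_from_labels (sent : List (String × String)) : List String :=
  (sent.foldl
    (fun (st : List String × String) p =>
      let current_word := st.2 ++ p.1
      if p.2 == "E" || p.2 == "S" then (st.1 ++ [current_word], "")
      else (st.1, current_word))
    (([] : List String), "")).1

-- ===== PORT B =====
-- 'notBoundary' is the loop's test negated: the enumerate-with-break finds the first
-- boundary, i.e. splits rest at the first pair failing notBoundary (takeWhile/dropWhile).
def notBoundary (p : String × String) : Bool := !(p.2 == "E" || p.2 == "S")

def word_seq_from_labels_alt (rest : List (String × String)) : List String :=
  match h : rest.dropWhile notBoundary with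
  | [] => []   -- no boundary found: remaining chars dropped
  | b :: rest' =>
      -- "".join over rest[:k+1] = chars before the boundary plus the boundary char
      (((rest.takeWhile notBoundary).map Prod.fst ++ [b.1]).foldl (· ++ ·) "")
        :: word_seq_from_labels_alt rest'
termination_by rest.length
decreasing_by
  have h1 : (rest.dropWhile notBoundary).length ≤ rest.length :=
    List.length_dropWhile_le _ _
  rw [h] at h1
  simpa using Nat.lt_of_succ_le (by simpa using h1)

-- ===== PRECONDITION & SPEC =====
def Spec_word_seq_from_labels (sent : List (String × String)) (out : List String) : Prop := out = word_seq_from_labels_alt sent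
instance (sent : List (String × String)) (out : List String) : Decidable (Spec_word_seq_from_labels sent out) := by unfold Spec_word_seq_from_labels; infer_instance

-- ===== CLAIM (what is proved, stated in full; the proofs are below) =====
def Claim_equal_word_seq_from_labels : Prop := ∀ (sent : List (String × String)), Dom_word_seq_from_labels sent → Spec_word_seq_from_labels sent (word_seq_from_labels sent)

-- ===== LEMMAS AND PROOFS =====

-- A's loop with the accumulated words factored out, keeping only the pending prefix.
def auxP (acc : String) : List (String × String) → List String
  | [] => []
  | p :: t =>
      if p.2 == "E" || p.2 == "S" then (acc ++ p.1) :: auxP "" t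
      else auxP (acc ++ p.1) t

lemma foldA_eq_auxP (sent : List (String × String)) :
    ∀ (ws : List String) (acc : String),
      (sent.foldl
        (fun (st : List String × String) p =>
          let current_word := st.2 ++ p.1
          if p.2 == "E" || p.2 == "S" then (st.1 ++ [current_word], "")
          else (st.1, current_word)) (ws, acc)).1 = ws ++ auxP acc sent := by
  induction sent with
  | nil => intro ws acc; simp [auxP]
  | cons p t ih =>
      intro ws acc
      cases hb : (p.2 == "E" || p.2 == "S") with
      | true =>
          simp only [List.foldl_cons, auxP, hb, if_pos]
          rw [ih]
          simp
      | false =>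
          simp only [List.foldl_cons, auxP, hb]
          rw [if_neg (by simp), if_neg (by simp), ih]

lemma foldl_append_init (xs : List String) :
    ∀ (s : String), xs.foldl (· ++ ·) s = s ++ xs.foldl (· ++ ·) "" := by
  induction xs with
  | nil => intro s; simp
  | cons x t ih =>
      intro s
      simp only [List.foldl_cons]
      rw [ih (s ++ x), ih ("" ++ x)]
      simp [String.append_assoc]

-- B's recursion with a pending prefix prepended to the first emitted word.
def altP (acc : String) (rest : List (String × String)) : List String :=
  match rest.dropWhile notBoundary with
  | [] => []
  | b :: rest' =>
      (acc ++ ((rest.takeWhile notBoundary).map Prod.fst ++ [b.1]).foldl (· ++ ·) "")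
        :: word_seq_from_labels_alt rest'

lemma altP_empty (rest : List (String × String)) :
    altP "" rest = word_seq_from_labels_alt rest := by
  rw [word_seq_from_labels_alt, altP]
  rcases h : rest.dropWhile notBoundary with _ | ⟨b, rest'⟩ <;> simp

lemma auxP_eq_altP (sent : List (String × String)) :
    ∀ (acc : String), auxP acc sent = altP acc sent := by
  induction sent with
  | nil => intro acc; simp [auxP, altP]
  | cons p t ih =>
      intro acc
      cases hb : (p.2 == "E" || p.2 == "S") with
      | true =>
          have hn : notBoundary p = false := by simp [notBoundary, hb]
          rw [auxP, altP]
          simp only [List.dropWhile_cons, List.takeWhile_cons, hn, hb, if_pos,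
            Bool.false_eq_true, if_false]
          simp [ih, altP_empty]
      | false =>
          have hn : notBoundary p = true := by simp [notBoundary, hb]
          rw [auxP, altP]
          simp only [List.dropWhile_cons, List.takeWhile_cons, hn, hb,
            Bool.false_eq_true, if_false, if_pos]
          rw [ih (acc ++ p.1), altP]
          rcases h : t.dropWhile notBoundary with _ | ⟨b, rest'⟩
          · simp
          · simp only [List.map_cons]
            congr 1
            rw [List.cons_append, List.foldl_cons, foldl_append_init _ ("" ++ p.1)]
            simp [String.append_assoc]

-- ===== VERDICT (by name: the statement is the Claim_ definition above) =====
theorem word_seq_from_labels_spec : Claim_equal_word_seq_from_labels := by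
  intro sent _
  unfold Spec_word_seq_from_labels word_seq_from_labels
  rw [foldA_eq_auxP sent [] "", auxP_eq_altP, altP_empty]
  simp
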